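-- pv_equiv track=rewrite | github.com/cog-isa/htm-core | mind_vision_experiment/exp_test_merge_inputs.py | make_bubble
-- ===== SOURCE A (Python) =====
-- def make_bubble(a, scale):
--     square_size = len(a)
--     result = [[0 for _ in range(square_size * scale)] for _ in range(square_size * scale)]
--     for i in range(square_size):
--         for j in range(square_size):
--             if a[i][j]:
--                 for x in range(i * scale, (i + 1) * scale):
--                     for y in range(j * scale, (j + 1) * scale):
--                         result[x][y] = 1
--     return result
-- ===== SOURCE B (Python) =====
-- def make_bubble(a, scale):
--     n = len(a) * scale
--     return [[1 if a[x // scale][y // scale] else 0 for y in range(n)]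
--             for x in range(n)]
-- ===== Notes on version B (the rewrite author's own statement) =====
-- stated objective: simpler
-- what changed: Replaces the allocate-then-mutate block-write loops (four nested loops plus a zero-initialised matrix) by a single double comprehension over output coordinates that reads the source cell via floor division.
import Mathlib
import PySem

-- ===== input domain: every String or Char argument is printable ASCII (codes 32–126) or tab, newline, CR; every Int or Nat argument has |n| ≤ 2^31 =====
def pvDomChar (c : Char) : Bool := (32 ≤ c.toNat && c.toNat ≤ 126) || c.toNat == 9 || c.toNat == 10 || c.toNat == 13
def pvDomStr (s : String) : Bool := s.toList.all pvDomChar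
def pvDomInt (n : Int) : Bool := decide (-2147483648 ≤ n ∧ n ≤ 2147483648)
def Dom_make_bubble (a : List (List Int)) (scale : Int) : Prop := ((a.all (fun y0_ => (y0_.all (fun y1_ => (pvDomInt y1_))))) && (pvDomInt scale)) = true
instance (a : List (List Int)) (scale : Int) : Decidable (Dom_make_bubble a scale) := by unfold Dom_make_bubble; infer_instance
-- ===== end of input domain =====

-- B rebuilds the matrix as a per-output-cell double comprehension with floor-division
-- index mapping, instead of A's zero matrix mutated by block writes; objective: simpler.

-- ===== PORT A =====
def make_bubble (a : List (List Int)) (scale : Int) : List (List Int) :=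
  let square_size : Int := a.length
  let result : List (List Int) :=
    (PySem.List.pyRange 0 (square_size * scale) 1).map (fun _ =>
      (PySem.List.pyRange 0 (square_size * scale) 1).map (fun _ => (0 : Int)))
  (PySem.List.pyRange 0 square_size 1).foldl (fun result i =>
    (PySem.List.pyRange 0 square_size 1).foldl (fun result j =>
      if PySem.List.pyGetD (PySem.List.pyGetD a i []) j 0 ≠ 0 then
        (PySem.List.pyRange (i * scale) ((i + 1) * scale) 1).foldl (fun result x =>
          (PySem.List.pyRange (j * scale) ((j + 1) * scale) 1).foldl (fun result y =>
            result.set x.toNat ((result.getD x.toNat []).set y.toNat 1)) result) result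
      else result) result) result

-- ===== PORT B =====
def make_bubble_alt (a : List (List Int)) (scale : Int) : List (List Int) :=
  let n : Int := (a.length : Int) * scale
  (PySem.List.pyRange 0 n 1).map (fun x =>
    (PySem.List.pyRange 0 n 1).map (fun y =>
      if PySem.List.pyGetD (PySem.List.pyGetD a (PySem.Int.floordiv x scale) [])
           (PySem.Int.floordiv y scale) 0 ≠ 0 then 1 else 0))

-- ===== PRECONDITION & SPEC =====
-- Pre_ excludes exactly the ragged inputs on which A raises IndexError: a row shorter
-- than len(a) is read by a[i][j] for j < len(a).
def Pre_make_bubble (a : List (List Int)) (scale : Int) : Prop :=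
  ∀ row ∈ a, a.length ≤ row.length

instance (a : List (List Int)) (scale : Int) : Decidable (Pre_make_bubble a scale) := by
  unfold Pre_make_bubble; infer_instance

def pvWitness_make_bubble : List (List Int) × Int := ([[1, 0], [0, 1]], 2)

def Spec_make_bubble (a : List (List Int)) (scale : Int) (out : List (List Int)) : Prop := out = make_bubble_alt a scale
instance (a : List (List Int)) (scale : Int) (out : List (List Int)) : Decidable (Spec_make_bubble a scale out) := by unfold Spec_make_bubble; infer_instance

-- ===== CLAIM (what is proved, stated in full; the proofs are below) =====
def Claim_equal_make_bubble : Prop := ∀ (a : List (List Int)) (scale : Int), Dom_make_bubble a scale → Pre_make_bubble a scale → Spec_make_bubble a scale (make_bubble a scale)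


-- ===== LEMMAS AND PROOFS =====

-- the "matrix as a function of its coordinates" representation shared by the proofs
def pvRep (N : Int) (f : Int → Int → Int) : List (List Int) :=
  (PySem.List.pyRange 0 N 1).map (fun x => (PySem.List.pyRange 0 N 1).map (fun y => f x y))

theorem pvRep_congr (N : Int) (f g : Int → Int → Int)
    (h : ∀ x y, 0 ≤ x → x < N → 0 ≤ y → y < N → f x y = g x y) :
    pvRep N f = pvRep N g := by
  unfold pvRep
  refine List.map_congr_left (fun x hx => ?_)
  refine List.map_congr_left (fun y hy => ?_)
  rw [PySem.List.mem_pyRange_one] at hx hy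
  exact h x y hx.1 hx.2 hy.1 hy.2

theorem set_map_pyRange {α : Type} (N x : Int) (g : Int → α) (v : α)
    (hx : 0 ≤ x) :
    ((PySem.List.pyRange 0 N 1).map g).set x.toNat v
      = (PySem.List.pyRange 0 N 1).map (fun t => if t = x then v else g t) := by
  apply List.ext_getElem
  · simp
  · intro k h1 h2
    have hk : k < (N - 0).toNat := by
      simpa [PySem.List.length_pyRange_one] using h2
    simp only [List.getElem_set, List.getElem_map, PySem.List.getElem_pyRange_one]
    split_ifs with hc1 hc2 hc2 <;> first | rfl | omega

theorem setCell_rep (N x y : Int) (f : Int → Int → Int)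
    (hx : 0 ≤ x) (hxN : x < N) (hy : 0 ≤ y) :
    (pvRep N f).set x.toNat (((pvRep N f).getD x.toNat []).set y.toNat 1)
      = pvRep N (fun x' y' => if x' = x ∧ y' = y then 1 else f x' y') := by
  have hxlt : x.toNat < (PySem.List.pyRange 0 N 1).length := by
    rw [PySem.List.length_pyRange_one]; omega
  have hval : (PySem.List.pyRange 0 N 1)[x.toNat]'hxlt = x := by
    rw [PySem.List.getElem_pyRange_one]; omega
  have hget : (pvRep N f).getD x.toNat []
      = (PySem.List.pyRange 0 N 1).map (fun y' => f x y') := by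
    unfold pvRep
    rw [List.getD_eq_getElem _ _ (by simpa using hxlt), List.getElem_map, hval]
  rw [hget, set_map_pyRange N y _ 1 hy]
  unfold pvRep
  rw [set_map_pyRange N x _ _ hx]
  refine List.map_congr_left (fun t ht => ?_)
  by_cases htx : t = x
  · subst htx
    rw [if_pos rfl]
    refine List.map_congr_left (fun u hu => ?_)
    by_cases huy : u = y <;> simp [huy]
  · simp only [if_neg htx]
    refine List.map_congr_left (fun u hu => ?_)
    simp [htx]

theorem row_fold (N x : Int) (ys : List Int) (f : Int → Int → Int)
    (hx : 0 ≤ x) (hxN : x < N) (hys : ∀ y ∈ ys, 0 ≤ y ∧ y < N) :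
    ys.foldl (fun m y => m.set x.toNat ((m.getD x.toNat []).set y.toNat 1)) (pvRep N f)
      = pvRep N (fun x' y' => if x' = x ∧ y' ∈ ys then 1 else f x' y') := by
  induction ys generalizing f with
  | nil => simp
  | cons y0 ys ih =>
    simp only [List.foldl_cons]
    rw [setCell_rep N x y0 f hx hxN (hys y0 (by simp)).1]
    rw [ih (fun x' y' => if x' = x ∧ y' = y0 then 1 else f x' y')
        (fun y' hy' => hys y' (List.mem_cons_of_mem _ hy'))]
    apply pvRep_congr
    intro x' y' _ _ _ _
    by_cases h1 : x' = x <;> by_cases h2 : y' ∈ ys <;> by_cases h3 : y' = y0 <;>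
      simp [h1, h2, h3]

theorem block_fold (N : Int) (xs ys : List Int) (f : Int → Int → Int)
    (hxs : ∀ x ∈ xs, 0 ≤ x ∧ x < N) (hys : ∀ y ∈ ys, 0 ≤ y ∧ y < N) :
    xs.foldl (fun m x =>
        ys.foldl (fun m y => m.set x.toNat ((m.getD x.toNat []).set y.toNat 1)) m)
      (pvRep N f)
      = pvRep N (fun x' y' => if x' ∈ xs ∧ y' ∈ ys then 1 else f x' y') := by
  induction xs generalizing f with
  | nil => simp
  | cons x0 xs ih =>
    simp only [List.foldl_cons]
    rw [row_fold N x0 ys f (hxs x0 (by simp)).1 (hxs x0 (by simp)).2 hys]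
    rw [ih (fun x' y' => if x' = x0 ∧ y' ∈ ys then 1 else f x' y')
        (fun x' hx' => hxs x' (List.mem_cons_of_mem _ hx'))]
    apply pvRep_congr
    intro x' y' _ _ _ _
    by_cases h1 : x' ∈ xs <;> by_cases h2 : x' = x0 <;> by_cases h3 : y' ∈ ys <;>
      simp [h1, h2, h3]

theorem range_bound (L scale i : Int) (hi : 0 ≤ i) (hiL : i < L) :
    ∀ x ∈ PySem.List.pyRange (i * scale) ((i + 1) * scale) 1, 0 ≤ x ∧ x < L * scale := by
  intro x hx
  rw [PySem.List.mem_pyRange_one] at hx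
  obtain ⟨h1, h2⟩ := hx
  have hs : 0 < scale := by nlinarith
  constructor
  · exact le_trans (mul_nonneg hi hs.le) h1
  · exact lt_of_lt_of_le h2 (mul_le_mul_of_nonneg_right (by omega) hs.le)

theorem col_fold (a : List (List Int)) (scale i : Int) (hi : 0 ≤ i)
    (hiL : i < (a.length : Int)) (js : List Int)
    (hjs : ∀ j ∈ js, 0 ≤ j ∧ j < (a.length : Int)) (f : Int → Int → Int) :
    js.foldl (fun m j =>
        if PySem.List.pyGetD (PySem.List.pyGetD a i []) j 0 ≠ 0 then
          (PySem.List.pyRange (i * scale) ((i + 1) * scale) 1).foldl (fun m x =>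
            (PySem.List.pyRange (j * scale) ((j + 1) * scale) 1).foldl (fun m y =>
              m.set x.toNat ((m.getD x.toNat []).set y.toNat 1)) m) m
        else m) (pvRep ((a.length : Int) * scale) f)
      = pvRep ((a.length : Int) * scale) (fun x y =>
          if ∃ j ∈ js, PySem.List.pyGetD (PySem.List.pyGetD a i []) j 0 ≠ 0 ∧
              i * scale ≤ x ∧ x < (i + 1) * scale ∧ j * scale ≤ y ∧ y < (j + 1) * scale
          then 1 else f x y) := by
  induction js generalizing f with
  | nil => simp
  | cons j0 js ih =>
    simp only [List.foldl_cons]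
    by_cases hc : PySem.List.pyGetD (PySem.List.pyGetD a i []) j0 0 ≠ 0
    · rw [if_pos hc,
        block_fold ((a.length : Int) * scale) _ _ f
          (range_bound (a.length : Int) scale i hi hiL)
          (range_bound (a.length : Int) scale j0 (hjs j0 (by simp)).1 (hjs j0 (by simp)).2),
        ih (fun j' hj' => hjs j' (List.mem_cons_of_mem _ hj'))]
      apply pvRep_congr
      intro x y _ _ _ _
      by_cases hE : ∃ j ∈ js, PySem.List.pyGetD (PySem.List.pyGetD a i []) j 0 ≠ 0 ∧
          i * scale ≤ x ∧ x < (i + 1) * scale ∧ j * scale ≤ y ∧ y < (j + 1) * scale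
      · obtain ⟨j, hj, hC⟩ := hE
        rw [if_pos ⟨j, hj, hC⟩, if_pos ⟨j, List.mem_cons_of_mem _ hj, hC⟩]
      · by_cases hB : x ∈ PySem.List.pyRange (i * scale) ((i + 1) * scale) 1 ∧
            y ∈ PySem.List.pyRange (j0 * scale) ((j0 + 1) * scale) 1
        · rw [if_neg hE, if_pos hB, if_pos]
          obtain ⟨hBx, hBy⟩ := hB
          rw [PySem.List.mem_pyRange_one] at hBx hBy
          exact ⟨j0, List.mem_cons_self,
            hc, hBx.1, hBx.2, hBy.1, hBy.2⟩
        · rw [if_neg hE, if_neg hB, if_neg]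
          rintro ⟨j, hj, hcell, h1, h2, h3, h4⟩
          rcases List.mem_cons.mp hj with hj0 | hjs'
          · subst hj0
            exact hB ⟨by rw [PySem.List.mem_pyRange_one]; exact ⟨h1, h2⟩,
              by rw [PySem.List.mem_pyRange_one]; exact ⟨h3, h4⟩⟩
          · exact hE ⟨j, hjs', hcell, h1, h2, h3, h4⟩
    · rw [if_neg hc, ih (fun j' hj' => hjs j' (List.mem_cons_of_mem _ hj'))]
      apply pvRep_congr
      intro x y _ _ _ _
      by_cases hE : ∃ j ∈ js, PySem.List.pyGetD (PySem.List.pyGetD a i []) j 0 ≠ 0 ∧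
          i * scale ≤ x ∧ x < (i + 1) * scale ∧ j * scale ≤ y ∧ y < (j + 1) * scale
      · obtain ⟨j, hj, hC⟩ := hE
        rw [if_pos ⟨j, hj, hC⟩, if_pos ⟨j, List.mem_cons_of_mem _ hj, hC⟩]
      · rw [if_neg hE, if_neg]
        rintro ⟨j, hj, hcell, hrest⟩
        rcases List.mem_cons.mp hj with hj0 | hjs'
        · subst hj0; exact hc hcell
        · exact hE ⟨j, hjs', hcell, hrest⟩

theorem rows_fold (a : List (List Int)) (scale : Int) (is : List Int)
    (his : ∀ i ∈ is, 0 ≤ i ∧ i < (a.length : Int)) (f : Int → Int → Int) :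
    is.foldl (fun m i =>
        (PySem.List.pyRange 0 (a.length : Int) 1).foldl (fun m j =>
          if PySem.List.pyGetD (PySem.List.pyGetD a i []) j 0 ≠ 0 then
            (PySem.List.pyRange (i * scale) ((i + 1) * scale) 1).foldl (fun m x =>
              (PySem.List.pyRange (j * scale) ((j + 1) * scale) 1).foldl (fun m y =>
                m.set x.toNat ((m.getD x.toNat []).set y.toNat 1)) m) m
          else m) m) (pvRep ((a.length : Int) * scale) f)
      = pvRep ((a.length : Int) * scale) (fun x y =>
          if ∃ i ∈ is, ∃ j ∈ PySem.List.pyRange 0 (a.length : Int) 1,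
              PySem.List.pyGetD (PySem.List.pyGetD a i []) j 0 ≠ 0 ∧
              i * scale ≤ x ∧ x < (i + 1) * scale ∧ j * scale ≤ y ∧ y < (j + 1) * scale
          then 1 else f x y) := by
  induction is generalizing f with
  | nil => simp
  | cons i0 is ih =>
    simp only [List.foldl_cons]
    rw [col_fold a scale i0 (his i0 (by simp)).1 (his i0 (by simp)).2
          (PySem.List.pyRange 0 (a.length : Int) 1)
          (fun j hj => by rw [PySem.List.mem_pyRange_one] at hj; exact ⟨hj.1, hj.2⟩) f,
        ih (fun i' hi' => his i' (List.mem_cons_of_mem _ hi'))]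
    apply pvRep_congr
    intro x y _ _ _ _
    by_cases hE2 : ∃ i ∈ is, ∃ j ∈ PySem.List.pyRange 0 (a.length : Int) 1,
        PySem.List.pyGetD (PySem.List.pyGetD a i []) j 0 ≠ 0 ∧
        i * scale ≤ x ∧ x < (i + 1) * scale ∧ j * scale ≤ y ∧ y < (j + 1) * scale
    · obtain ⟨i, hi, hC⟩ := hE2
      rw [if_pos ⟨i, hi, hC⟩, if_pos ⟨i, List.mem_cons_of_mem _ hi, hC⟩]
    · by_cases hE : ∃ j ∈ PySem.List.pyRange 0 (a.length : Int) 1,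
          PySem.List.pyGetD (PySem.List.pyGetD a i0 []) j 0 ≠ 0 ∧
          i0 * scale ≤ x ∧ x < (i0 + 1) * scale ∧ j * scale ≤ y ∧ y < (j + 1) * scale
      · rw [if_neg hE2, if_pos hE, if_pos ⟨i0, List.mem_cons_self, hE⟩]
      · rw [if_neg hE2, if_neg hE, if_neg]
        rintro ⟨i, hi, hC⟩
        rcases List.mem_cons.mp hi with hi0 | his'
        · subst hi0; exact hE hC
        · exact hE2 ⟨i, his', hC⟩

-- ===== VERDICT (by name: the statement is the Claim_ definition above) =====
theorem make_bubble_spec : Claim_equal_make_bubble := by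
  intro a scale _ hpre
  show make_bubble a scale = make_bubble_alt a scale
  have hL : (0 : Int) ≤ (a.length : Int) := by positivity
  have hA : make_bubble a scale
      = pvRep ((a.length : Int) * scale) (fun x y =>
          if ∃ i ∈ PySem.List.pyRange 0 (a.length : Int) 1,
              ∃ j ∈ PySem.List.pyRange 0 (a.length : Int) 1,
              PySem.List.pyGetD (PySem.List.pyGetD a i []) j 0 ≠ 0 ∧
              i * scale ≤ x ∧ x < (i + 1) * scale ∧ j * scale ≤ y ∧ y < (j + 1) * scale
          then 1 else 0) := by
    exact rows_fold a scale (PySem.List.pyRange 0 (a.length : Int) 1)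
      (fun i hi => by rw [PySem.List.mem_pyRange_one] at hi; exact ⟨hi.1, hi.2⟩)
      (fun _ _ => 0)
  have hB : make_bubble_alt a scale
      = pvRep ((a.length : Int) * scale) (fun x y =>
          if PySem.List.pyGetD (PySem.List.pyGetD a (PySem.Int.floordiv x scale) [])
               (PySem.Int.floordiv y scale) 0 ≠ 0 then 1 else 0) := rfl
  rw [hA, hB]
  apply pvRep_congr
  intro x y hx0 hxN hy0 hyN
  have hs : 0 < scale := by nlinarith
  have hLpos : (0 : Int) < (a.length : Int) := by nlinarith
  have hfx : PySem.Int.floordiv x scale * scale ≤ x ∧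
      x < (PySem.Int.floordiv x scale + 1) * scale :=
    (PySem.Int.floordiv_eq_iff_of_pos hs).mp rfl
  have hfy : PySem.Int.floordiv y scale * scale ≤ y ∧
      y < (PySem.Int.floordiv y scale + 1) * scale :=
    (PySem.Int.floordiv_eq_iff_of_pos hs).mp rfl
  have hfx0 : 0 ≤ PySem.Int.floordiv x scale := by
    rw [PySem.Int.le_floordiv_iff_mul_le hs]; nlinarith
  have hfxL : PySem.Int.floordiv x scale < (a.length : Int) := by
    rw [PySem.Int.floordiv_lt_iff_lt_mul hs]; nlinarith
  have hfy0 : 0 ≤ PySem.Int.floordiv y scale := by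
    rw [PySem.Int.le_floordiv_iff_mul_le hs]; nlinarith
  have hfyL : PySem.Int.floordiv y scale < (a.length : Int) := by
    rw [PySem.Int.floordiv_lt_iff_lt_mul hs]; nlinarith
  by_cases hc : PySem.List.pyGetD (PySem.List.pyGetD a (PySem.Int.floordiv x scale) [])
      (PySem.Int.floordiv y scale) 0 ≠ 0
  · rw [if_pos hc, if_pos]
    exact ⟨PySem.Int.floordiv x scale,
      by rw [PySem.List.mem_pyRange_one]; exact ⟨hfx0, hfxL⟩,
      PySem.Int.floordiv y scale,
      by rw [PySem.List.mem_pyRange_one]; exact ⟨hfy0, hfyL⟩,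
      hc, hfx.1, hfx.2, hfy.1, hfy.2⟩
  · rw [if_neg hc, if_neg]
    rintro ⟨i, hi, j, hj, hcell, h1, h2, h3, h4⟩
    have hix : PySem.Int.floordiv x scale = i :=
      (PySem.Int.floordiv_eq_iff_of_pos hs).mpr ⟨h1, h2⟩
    have hjy : PySem.Int.floordiv y scale = j :=
      (PySem.Int.floordiv_eq_iff_of_pos hs).mpr ⟨h3, h4⟩
    rw [hix, hjy] at hc
    exact hc hcell
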